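-- pv_equiv track=rewrite | github.com/kunal22-jpg/Hackunited1 | backend/server.py | generate_possible_conditions
-- ===== SOURCE A (Python) =====
-- from typing import List, Optional, Dict, Any
-- from typing import List
--
-- def generate_possible_conditions(symptoms: List[str], body_parts: List[str], age: int = None, gender: str = None) -> List[Dict[str, Any]]:
--     """Generate possible conditions based on symptoms and patient info"""
--     symptom_text = ' '.join(symptoms).lower()
--
--     conditions = []
--
--     # Common conditions based on symptoms
--     if any(word in symptom_text for word in ["fever", "cough", "runny nose", "sore throat"]):
--         conditions.append({
--             "name": "Upper Respiratory Infection",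
--             "probability": "65%",
--             "description": "Common cold or viral infection affecting nose, throat, and sinuses"
--         })
--         conditions.append({
--             "name": "Flu (Influenza)",
--             "probability": "25%",
--             "description": "Viral infection affecting respiratory system with systemic symptoms"
--         })
--
--     if any(word in symptom_text for word in ["headache", "head"]):
--         conditions.append({
--             "name": "Tension Headache",
--             "probability": "50%",
--             "description": "Most common type of headache, often stress-related"
--         })
--         conditions.append({
--             "name": "Migraine",
--             "probability": "30%",
--             "description": "Severe headache often accompanied by nausea and light sensitivity"
--         })
--
--     if any(word in symptom_text for word in ["stomach", "abdominal", "nausea", "vomiting"]):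
--         conditions.append({
--             "name": "Gastroenteritis",
--             "probability": "45%",
--             "description": "Inflammation of stomach and intestines, often viral or bacterial"
--         })
--         conditions.append({
--             "name": "Food Poisoning",
--             "probability": "35%",
--             "description": "Illness caused by contaminated food or drink"
--         })
--
--     if any(word in symptom_text for word in ["fatigue", "tired", "exhausted"]):
--         conditions.append({
--             "name": "Viral Syndrome",
--             "probability": "40%",
--             "description": "General viral infection causing fatigue and malaise"
--         })
--         conditions.append({
--             "name": "Sleep Deprivation",
--             "probability": "30%",
--             "description": "Insufficient or poor quality sleep affecting daily function"
--         })
--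
--     # Default condition if no specific match
--     if not conditions:
--         conditions.append({
--             "name": "General Health Concern",
--             "probability": "Unknown",
--             "description": "Symptoms require professional medical evaluation for proper diagnosis"
--         })
--
--     return conditions[:3]  # Return top 3 conditions
-- ===== SOURCE B (Python) =====
-- from typing import List, Optional, Dict, Any
--
-- # keyword -> bit of the symptom group it belongs to
-- _KW_BITS = [
--     ("fever", 1), ("cough", 1), ("runny nose", 1), ("sore throat", 1),
--     ("headache", 2), ("head", 2),
--     ("stomach", 4), ("abdominal", 4), ("nausea", 4), ("vomiting", 4),
--     ("fatigue", 8), ("tired", 8), ("exhausted", 8),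
-- ]
--
-- _GROUPS = [
--     [{"name": "Upper Respiratory Infection", "probability": "65%",
--       "description": "Common cold or viral infection affecting nose, throat, and sinuses"},
--      {"name": "Flu (Influenza)", "probability": "25%",
--       "description": "Viral infection affecting respiratory system with systemic symptoms"}],
--     [{"name": "Tension Headache", "probability": "50%",
--       "description": "Most common type of headache, often stress-related"},
--      {"name": "Migraine", "probability": "30%",
--       "description": "Severe headache often accompanied by nausea and light sensitivity"}],
--     [{"name": "Gastroenteritis", "probability": "45%",
--       "description": "Inflammation of stomach and intestines, often viral or bacterial"},
--      {"name": "Food Poisoning", "probability": "35%",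
--       "description": "Illness caused by contaminated food or drink"}],
--     [{"name": "Viral Syndrome", "probability": "40%",
--       "description": "General viral infection causing fatigue and malaise"},
--      {"name": "Sleep Deprivation", "probability": "30%",
--       "description": "Insufficient or poor quality sleep affecting daily function"}],
-- ]
--
-- _DEFAULT = {"name": "General Health Concern", "probability": "Unknown",
--             "description": "Symptoms require professional medical evaluation for proper diagnosis"}
--
--
-- def _build(mask):
--     out = []
--     bit = 1
--     for grp in _GROUPS:
--         if mask & bit:
--             out.extend(grp)
--         bit <<= 1
--     out = out[:3]
--     return out or [_DEFAULT]
--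
--
-- # all 16 possible answers, precomputed once: index = bitmask of matched groups
-- _TABLE = [_build(m) for m in range(16)]
--
--
-- def generate_possible_conditions(symptoms: List[str], body_parts: List[str], age: int = None, gender: str = None) -> List[Dict[str, Any]]:
--     symptom_text = ' '.join(symptoms).lower()
--     mask = 0
--     for kw, bit in _KW_BITS:
--         if kw in symptom_text:
--             mask |= bit
--     return [dict(c) for c in _TABLE[mask]]
-- ===== Notes on version B (the rewrite author's own statement) =====
-- stated objective: alternative
-- what changed: B replaces the conditional list-building with a precomputed 16-entry lookup table: it maps each keyword to a group bit, ORs the bits of the keywords found in the text into a 4-bit mask, and returns the table entry for that mask (all truncation and the default answer are baked into the table at import time).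
import Mathlib
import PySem

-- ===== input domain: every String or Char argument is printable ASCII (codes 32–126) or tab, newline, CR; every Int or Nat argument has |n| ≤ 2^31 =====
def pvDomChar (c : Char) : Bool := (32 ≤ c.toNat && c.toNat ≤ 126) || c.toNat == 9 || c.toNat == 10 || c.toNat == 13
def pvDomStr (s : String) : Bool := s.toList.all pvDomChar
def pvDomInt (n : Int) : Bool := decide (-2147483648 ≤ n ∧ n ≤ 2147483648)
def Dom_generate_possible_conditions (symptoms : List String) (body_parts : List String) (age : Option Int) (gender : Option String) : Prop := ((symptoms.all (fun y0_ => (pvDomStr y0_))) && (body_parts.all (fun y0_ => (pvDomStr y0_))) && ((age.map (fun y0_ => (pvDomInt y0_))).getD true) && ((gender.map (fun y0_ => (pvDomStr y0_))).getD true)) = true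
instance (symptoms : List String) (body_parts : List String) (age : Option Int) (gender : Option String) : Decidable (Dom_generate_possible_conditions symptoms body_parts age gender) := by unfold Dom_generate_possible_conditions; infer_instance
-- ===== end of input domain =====

-- ===== PORT A =====
-- B computes the same answer via a keyword→bit mask and a precomputed 16-entry lookup table (objective: alternative algorithm, same observable behaviour).
def generate_possible_conditions (symptoms : List String) (body_parts : List String) (age : Option Int) (gender : Option String) : List (List (String × String)) :=
  let symptom_text := PySem.Str.lower (PySem.Str.join " " symptoms)
  let conditions : List (List (String × String)) := []
  let conditions := if (["fever", "cough", "runny nose", "sore throat"].any (fun w => PySem.Str.isIn w symptom_text)) then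
      conditions ++ [[("name", "Upper Respiratory Infection"), ("probability", "65%"), ("description", "Common cold or viral infection affecting nose, throat, and sinuses")],
                     [("name", "Flu (Influenza)"), ("probability", "25%"), ("description", "Viral infection affecting respiratory system with systemic symptoms")]]
    else conditions
  let conditions := if (["headache", "head"].any (fun w => PySem.Str.isIn w symptom_text)) then
      conditions ++ [[("name", "Tension Headache"), ("probability", "50%"), ("description", "Most common type of headache, often stress-related")],
                     [("name", "Migraine"), ("probability", "30%"), ("description", "Severe headache often accompanied by nausea and light sensitivity")]]
    else conditions
  let conditions := if (["stomach", "abdominal", "nausea", "vomiting"].any (fun w => PySem.Str.isIn w symptom_text)) then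
      conditions ++ [[("name", "Gastroenteritis"), ("probability", "45%"), ("description", "Inflammation of stomach and intestines, often viral or bacterial")],
                     [("name", "Food Poisoning"), ("probability", "35%"), ("description", "Illness caused by contaminated food or drink")]]
    else conditions
  let conditions := if (["fatigue", "tired", "exhausted"].any (fun w => PySem.Str.isIn w symptom_text)) then
      conditions ++ [[("name", "Viral Syndrome"), ("probability", "40%"), ("description", "General viral infection causing fatigue and malaise")],
                     [("name", "Sleep Deprivation"), ("probability", "30%"), ("description", "Insufficient or poor quality sleep affecting daily function")]]
    else conditions
  let conditions := if conditions.isEmpty then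
      conditions ++ [[("name", "General Health Concern"), ("probability", "Unknown"), ("description", "Symptoms require professional medical evaluation for proper diagnosis")]]
    else conditions
  PySem.List.slice conditions none (some 3)

-- ===== PORT B =====
-- keyword -> group bit (Python _KW_BITS)
def gpcKwBits : List (String × Nat) :=
  [("fever", 1), ("cough", 1), ("runny nose", 1), ("sore throat", 1),
   ("headache", 2), ("head", 2),
   ("stomach", 4), ("abdominal", 4), ("nausea", 4), ("vomiting", 4),
   ("fatigue", 8), ("tired", 8), ("exhausted", 8)]

def gpcGroups : List (List (List (String × String))) :=
  [[[("name", "Upper Respiratory Infection"), ("probability", "65%"), ("description", "Common cold or viral infection affecting nose, throat, and sinuses")],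
    [("name", "Flu (Influenza)"), ("probability", "25%"), ("description", "Viral infection affecting respiratory system with systemic symptoms")]],
   [[("name", "Tension Headache"), ("probability", "50%"), ("description", "Most common type of headache, often stress-related")],
    [("name", "Migraine"), ("probability", "30%"), ("description", "Severe headache often accompanied by nausea and light sensitivity")]],
   [[("name", "Gastroenteritis"), ("probability", "45%"), ("description", "Inflammation of stomach and intestines, often viral or bacterial")],
    [("name", "Food Poisoning"), ("probability", "35%"), ("description", "Illness caused by contaminated food or drink")]],
   [[("name", "Viral Syndrome"), ("probability", "40%"), ("description", "General viral infection causing fatigue and malaise")],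
    [("name", "Sleep Deprivation"), ("probability", "30%"), ("description", "Insufficient or poor quality sleep affecting daily function")]]]

def gpcDefault : List (String × String) :=
  [("name", "General Health Concern"), ("probability", "Unknown"), ("description", "Symptoms require professional medical evaluation for proper diagnosis")]

-- Python _build(mask): walk the groups with a shifting bit, keep the masked ones, truncate, default if empty
def gpcBuild (mask : Nat) : List (List (String × String)) :=
  let st := gpcGroups.foldl (fun (st : List (List (String × String)) × Nat) grp =>
      (if mask &&& st.2 ≠ 0 then st.1 ++ grp else st.1, st.2 <<< 1)) ([], 1)
  let out := PySem.List.slice st.1 none (some 3)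
  if out.isEmpty then [gpcDefault] else out

-- Python _TABLE = [_build(m) for m in range(16)]
def gpcTable : List (List (List (String × String))) := (List.range 16).map gpcBuild

def generate_possible_conditions_alt (symptoms : List String) (body_parts : List String) (age : Option Int) (gender : Option String) : List (List (String × String)) :=
  let symptom_text := PySem.Str.lower (PySem.Str.join " " symptoms)
  let mask := gpcKwBits.foldl (fun m p => if PySem.Str.isIn p.1 symptom_text then m ||| p.2 else m) 0
  -- Python _TABLE[mask]: mask < 16 always (it is an OR of bits 1,2,4,8), so the [] default is unreachable
  gpcTable.getD mask []

-- ===== PRECONDITION & SPEC =====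
def Spec_generate_possible_conditions (symptoms : List String) (body_parts : List String) (age : Option Int) (gender : Option String) (out : List (List (String × String))) : Prop := out = generate_possible_conditions_alt symptoms body_parts age gender
instance (symptoms : List String) (body_parts : List String) (age : Option Int) (gender : Option String) (out : List (List (String × String))) : Decidable (Spec_generate_possible_conditions symptoms body_parts age gender out) := by unfold Spec_generate_possible_conditions; infer_instance

-- ===== CLAIM (what is proved, stated in full; the proofs are below) =====
def Claim_equal_generate_possible_conditions : Prop := ∀ (symptoms : List String) (body_parts : List String) (age : Option Int) (gender : Option String), Dom_generate_possible_conditions symptoms body_parts age gender → Spec_generate_possible_conditions symptoms body_parts age gender (generate_possible_conditions symptoms body_parts age gender)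

-- ===== LEMMAS AND PROOFS =====

-- one mask-accumulation step: pull the OR out of the branch
theorem gpc_step (m b : Nat) (c : Bool) :
    (if c = true then m ||| b else m) = m ||| (if c = true then b else 0) := by
  cases c <;> simp

-- two adjacent keywords of the same group merge into one disjunction
theorem gpc_merge (m b : Nat) (c d : Bool) :
    (m ||| (if c = true then b else 0)) ||| (if d = true then b else 0)
      = m ||| (if (c || d) = true then b else 0) := by
  cases c <;> cases d <;> simp [Nat.or_assoc, Nat.or_self]

-- ===== VERDICT (by name: the statement is the Claim_ definition above) =====
set_option maxHeartbeats 2000000 in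
theorem generate_possible_conditions_spec : Claim_equal_generate_possible_conditions := by
  intro symptoms body_parts age gender _
  unfold Spec_generate_possible_conditions generate_possible_conditions generate_possible_conditions_alt gpcKwBits
  simp only [List.foldl_cons, List.foldl_nil, List.any_cons, List.any_nil, Bool.or_false,
             gpc_step, gpc_merge, Bool.or_assoc]
  generalize PySem.Str.lower (PySem.Str.join " " symptoms) = T
  by_cases h1 : (PySem.Str.isIn "fever" T || (PySem.Str.isIn "cough" T || (PySem.Str.isIn "runny nose" T || PySem.Str.isIn "sore throat" T))) = true <;>
  by_cases h2 : (PySem.Str.isIn "headache" T || PySem.Str.isIn "head" T) = true <;>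
  by_cases h3 : (PySem.Str.isIn "stomach" T || (PySem.Str.isIn "abdominal" T || (PySem.Str.isIn "nausea" T || PySem.Str.isIn "vomiting" T))) = true <;>
  by_cases h4 : (PySem.Str.isIn "fatigue" T || (PySem.Str.isIn "tired" T || PySem.Str.isIn "exhausted" T)) = true <;>
  simp only [h1, h2, h3, h4, if_true, if_false, eq_self_iff_true] <;>
  decide
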